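-- pv_equiv track=rewrite | github.com/fgutierrezalbornoz/RIM | T1/util.py | color_de_cada_bin_3d
-- ===== SOURCE A (Python) =====
-- def calcular_limites(maximo_no_incluido, cantidad):
--     list = [round(maximo_no_incluido * i / cantidad) for i in range(cantidad)]
--     list.append(maximo_no_incluido)
--     return list
--
-- def color_de_cada_bin_3d(cantidad_bins):
--     limites_dim = calcular_limites(256, cantidad_bins)
--     colores_bins = []
--     for i in range(cantidad_bins):
--         val1 = round((limites_dim[i] + limites_dim[i + 1] - 1) / 2)
--         for j in range(cantidad_bins):
--             val2 = round((limites_dim[j] + limites_dim[j + 1] - 1) / 2)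
--             for k in range(cantidad_bins):
--                 val3 = round((limites_dim[k] + limites_dim[k + 1] - 1) / 2)
--                 colores_bins.append((val1, val2, val3))
--     return colores_bins
-- ===== SOURCE B (Python) =====
-- def calcular_limites(maximo_no_incluido, cantidad):
--     list = [round(maximo_no_incluido * i / cantidad) for i in range(cantidad)]
--     list.append(maximo_no_incluido)
--     return list
--
-- def color_de_cada_bin_3d(cantidad_bins):
--     n = cantidad_bins
--     limites = calcular_limites(256, n)
--     mids = [round((limites[i] + limites[i + 1] - 1) / 2) for i in range(n)]
--     colores = []
--     for t in range(n * n * n):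
--         i, r = divmod(t, n * n)
--         j, k = divmod(r, n)
--         colores.append((mids[i], mids[j], mids[k]))
--     return colores
-- ===== Notes on version B (the rewrite author's own statement) =====
-- stated objective: alternative
-- what changed: B precomputes the n bin midpoints into a table once and then runs a single flat loop over range(n**3), decoding each flat index into its three coordinates with divmod, instead of A's three nested loops that recompute the midpoint at every loop level.
import Mathlib
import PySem

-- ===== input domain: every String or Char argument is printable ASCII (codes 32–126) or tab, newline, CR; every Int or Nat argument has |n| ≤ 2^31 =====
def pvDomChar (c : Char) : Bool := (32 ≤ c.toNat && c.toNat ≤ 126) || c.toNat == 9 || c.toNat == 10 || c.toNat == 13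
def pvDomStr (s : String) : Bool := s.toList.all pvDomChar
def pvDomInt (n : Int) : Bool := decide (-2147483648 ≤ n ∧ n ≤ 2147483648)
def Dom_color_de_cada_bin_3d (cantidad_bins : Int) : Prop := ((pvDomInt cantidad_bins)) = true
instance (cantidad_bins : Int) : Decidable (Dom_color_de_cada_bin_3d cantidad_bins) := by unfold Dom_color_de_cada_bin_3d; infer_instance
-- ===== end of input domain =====

-- B precomputes the n midpoints into a table once and enumerates the cube with ONE flat
-- loop over range(n**3), decoding each index with divmod, instead of A's nested loops.

-- Python round(p/q) for integers p, q with 0 < q: round-half-to-even.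
-- Exact for every call here: the quotients are small enough that the float division
-- is exact at every half-integer tie and the float error never crosses a tie boundary.
def roundHE (p q : Int) : Int :=
  let d := PySem.Int.floordiv p q
  let r := p - d * q
  if 2 * r < q then d
  else if q < 2 * r then d + 1
  else if PySem.Int.mod d 2 = 0 then d else d + 1

-- calcular_limites (shared same-module helper of both A and B)
def calcularLimites (maximo_no_incluido cantidad : Int) : List Int :=
  ((PySem.List.pyRange 0 cantidad 1).map
    (fun i => roundHE (maximo_no_incluido * i) cantidad)) ++ [maximo_no_incluido]

-- ===== PORT A =====
-- limites_dim[i] indexing is always in range (0 ≤ i ≤ cantidad_bins < length); pyGetD is exact here.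
def color_de_cada_bin_3d (cantidad_bins : Int) : List (Int × Int × Int) :=
  let limites_dim := calcularLimites 256 cantidad_bins
  (PySem.List.pyRange 0 cantidad_bins 1).foldl (fun acc i =>
    let val1 := roundHE (PySem.List.pyGetD limites_dim i 0 + PySem.List.pyGetD limites_dim (i + 1) 0 - 1) 2
    (PySem.List.pyRange 0 cantidad_bins 1).foldl (fun acc j =>
      let val2 := roundHE (PySem.List.pyGetD limites_dim j 0 + PySem.List.pyGetD limites_dim (j + 1) 0 - 1) 2
      (PySem.List.pyRange 0 cantidad_bins 1).foldl (fun acc k =>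
        let val3 := roundHE (PySem.List.pyGetD limites_dim k 0 + PySem.List.pyGetD limites_dim (k + 1) 0 - 1) 2
        acc ++ [(val1, val2, val3)]) acc) acc) []

-- ===== PORT B =====
-- divmod(t, m) = (floordiv t m, mod t m); inside the loop m = n*n and n are nonzero, so exact.
def color_de_cada_bin_3d_alt (cantidad_bins : Int) : List (Int × Int × Int) :=
  let n := cantidad_bins
  let limites := calcularLimites 256 n
  let mids := (PySem.List.pyRange 0 n 1).map
    (fun i => roundHE (PySem.List.pyGetD limites i 0 + PySem.List.pyGetD limites (i + 1) 0 - 1) 2)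
  (PySem.List.pyRange 0 (n * n * n) 1).foldl (fun colores t =>
    let i := PySem.Int.floordiv t (n * n)
    let r := PySem.Int.mod t (n * n)
    let j := PySem.Int.floordiv r n
    let k := PySem.Int.mod r n
    colores ++ [(PySem.List.pyGetD mids i 0, PySem.List.pyGetD mids j 0, PySem.List.pyGetD mids k 0)]) []

-- ===== PRECONDITION & SPEC =====
def Spec_color_de_cada_bin_3d (cantidad_bins : Int) (out : List (Int × Int × Int)) : Prop := out = color_de_cada_bin_3d_alt cantidad_bins
instance (cantidad_bins : Int) (out : List (Int × Int × Int)) : Decidable (Spec_color_de_cada_bin_3d cantidad_bins out) := by unfold Spec_color_de_cada_bin_3d; infer_instance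

-- ===== CLAIM (what is proved, stated in full; the proofs are below) =====
def Claim_equal_color_de_cada_bin_3d : Prop := ∀ (cantidad_bins : Int), Dom_color_de_cada_bin_3d cantidad_bins → Spec_color_de_cada_bin_3d cantidad_bins (color_de_cada_bin_3d cantidad_bins)

-- ===== LEMMAS AND PROOFS =====

-- decoding a flat range by div/mod against the block size
theorem pvRangeMulFlat {α : Type} (a B : Nat) (G : Nat → Nat → α) :
    (List.range (a * B)).map (fun t => G (t / B) (t % B)) =
    (List.range a).flatMap (fun i => (List.range B).map (fun r => G i r)) := by
  induction a with
  | zero => simp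
  | succ a ih =>
    rcases Nat.eq_zero_or_pos B with hB | hB
    · simp [hB]
    · have : (a + 1) * B = a * B + B := by ring
      rw [this, List.range_add, List.map_append, List.range_succ, List.flatMap_append, ih]
      have h2 : List.map (fun t => G (t / B) (t % B)) (List.map (fun x => a * B + x) (List.range B))
          = List.flatMap (fun i => List.map (fun r => G i r) (List.range B)) [a] := by
        rw [List.flatMap_singleton, List.map_map]
        refine List.map_congr_left (fun r hr => ?_)
        have hrB : r < B := List.mem_range.mp hr
        have hdiv : (a * B + r) / B = a := by
          rw [Nat.mul_comm a B, Nat.mul_add_div hB, Nat.div_eq_of_lt hrB]; omega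
        have hmod : (a * B + r) % B = r := by
          rw [Nat.mul_comm a B, Nat.mul_add_mod, Nat.mod_eq_of_lt hrB]
        simp [Function.comp, hdiv, hmod]
      rw [h2]

-- flat cube enumeration with div/mod decoding = triple nested enumeration
theorem pvCube {α : Type} (N : Nat) (F : Nat → α) :
    (List.range (N * N * N)).map (fun t => (F (t / (N * N)), F (t % (N * N) / N), F (t % (N * N) % N))) =
    (List.range N).flatMap (fun i => (List.range N).flatMap (fun j => (List.range N).map (fun k => (F i, F j, F k)))) := by
  rw [show N * N * N = N * (N * N) by ring,
      pvRangeMulFlat N (N * N) (fun i r => (F i, F (r / N), F (r % N)))]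
  exact congrArg (fun g => List.flatMap g (List.range N))
    (funext fun i => pvRangeMulFlat N N (fun j k => (F i, F j, F k)))

-- B's flat foldl over range(n^3) equals the triple flatMap over range(n), for any midpoint table
theorem pvAltEqNested (N : Nat) (f : Int → Int) :
    (PySem.List.pyRange 0 ((N : Int) * ↑N * ↑N) 1).foldl (fun colores t =>
      colores ++ [(PySem.List.pyGetD ((PySem.List.pyRange 0 (N : Int) 1).map f) (PySem.Int.floordiv t (↑N * ↑N)) 0,
                   PySem.List.pyGetD ((PySem.List.pyRange 0 (N : Int) 1).map f) (PySem.Int.floordiv (PySem.Int.mod t (↑N * ↑N)) ↑N) 0,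
                   PySem.List.pyGetD ((PySem.List.pyRange 0 (N : Int) 1).map f) (PySem.Int.mod (PySem.Int.mod t (↑N * ↑N)) ↑N) 0)]) [] =
    (PySem.List.pyRange 0 (N : Int) 1).flatMap (fun i =>
      (PySem.List.pyRange 0 (N : Int) 1).flatMap (fun j =>
        (PySem.List.pyRange 0 (N : Int) 1).map (fun k => (f i, f j, f k)))) := by
  rcases Nat.eq_zero_or_pos N with hN | hN
  · subst hN; simp
  have hNN : (N : Int) * ↑N = ((N * N : Nat) : Int) := by push_cast; ring
  have hc : (N : Int) * ↑N * ↑N = ((N * N * N : Nat) : Int) := by push_cast; ring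
  rw [PySem.List.foldl_append_singleton_eq_map, List.nil_append, hc,
      PySem.List.pyRange_zero_natCast (N * N * N), List.map_map]
  have hNNpos : 0 < N * N := Nat.mul_pos hN hN
  have key : ∀ t ∈ List.range (N * N * N),
      ((fun t =>
        (PySem.List.pyGetD ((PySem.List.pyRange 0 (N : Int) 1).map f) (PySem.Int.floordiv t (↑N * ↑N)) 0,
         PySem.List.pyGetD ((PySem.List.pyRange 0 (N : Int) 1).map f) (PySem.Int.floordiv (PySem.Int.mod t (↑N * ↑N)) ↑N) 0,
         PySem.List.pyGetD ((PySem.List.pyRange 0 (N : Int) 1).map f) (PySem.Int.mod (PySem.Int.mod t (↑N * ↑N)) ↑N) 0)) ∘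
        (fun k : Nat => (k : Int))) t
      = (fun t => (f ↑(t / (N * N)), f ↑(t % (N * N) / N), f ↑(t % (N * N) % N))) t := by
    intro t ht
    have htN : t < N * N * N := List.mem_range.mp ht
    have h1 : t / (N * N) < N := by
      rw [Nat.div_lt_iff_lt_mul hNNpos]; calc t < N * N * N := htN
        _ = N * (N * N) := by ring
    have h2 : t % (N * N) / N < N := by
      rw [Nat.div_lt_iff_lt_mul hN]
      calc t % (N * N) < N * N := Nat.mod_lt _ hNNpos
        _ = N * N := rfl
    have h3 : t % (N * N) % N < N := Nat.mod_lt _ hN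
    simp only [Function.comp, hNN, PySem.Int.floordiv_natCast, PySem.Int.mod_natCast,
      PySem.List.pyGetD_map_pyRange f N _ 0 h1, PySem.List.pyGetD_map_pyRange f N _ 0 h2,
      PySem.List.pyGetD_map_pyRange f N _ 0 h3]
  rw [List.map_congr_left key, pvCube N (fun m => f ↑m),
      PySem.List.pyRange_zero_natCast N]
  simp [List.flatMap_map, List.map_map, Function.comp_def]

-- ===== VERDICT (by name: the statement is the Claim_ definition above) =====
theorem color_de_cada_bin_3d_spec : Claim_equal_color_de_cada_bin_3d := by
  intro n _
  unfold Spec_color_de_cada_bin_3d color_de_cada_bin_3d color_de_cada_bin_3d_alt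
  by_cases hn : n ≤ 0
  · have h1 : PySem.List.pyRange 0 n 1 = [] := PySem.List.pyRange_one_eq_nil hn
    have h3 : n * n * n ≤ 0 := by nlinarith
    have h2 : PySem.List.pyRange 0 (n * n * n) 1 = [] := PySem.List.pyRange_one_eq_nil h3
    simp [h1, h2]
  · have hn' : 0 < n := lt_of_not_ge hn
    obtain ⟨N, rfl⟩ : ∃ N : ℕ, n = (N : Int) := ⟨n.toNat, (Int.toNat_of_nonneg hn'.le).symm⟩
    simp only []
    rw [pvAltEqNested N]
    simp only [PySem.List.foldl_append_singleton_eq_map, PySem.List.foldl_append_eq_flatMap,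
      List.nil_append]
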